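-- pv_equiv track=rewrite | github.com/jramaswami/Binary_Search_Python | bunnyhopping.py | solve
-- ===== SOURCE A (Python) =====
-- import heapq
-- from collections import namedtuple
--
-- QItem = namedtuple('QItem', ['cost', 'index'])
--
-- def solve(nums, k):
--     Q = [QItem(nums[0], 0)]
--     cost = [0 for _ in nums]
--     for i, n in enumerate(nums[1:], start=1):
--         # Remove any items outside the window
--         while Q and Q[0].index < i - k:
--             cost[Q[0].index] = Q[0].cost
--             heapq.heappop(Q)
--         # Add shortest path to current index.
--         heapq.heappush(Q, QItem(n + Q[0].cost, i))
--
--     while Q: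
--         cost[Q[0].index] = Q[0].cost
--         heapq.heappop(Q)
--
--     return cost[-1]
-- ===== SOURCE B (Python) =====
-- from collections import deque
--
-- def solve(nums, k):
--     # Sliding-window minimum via a monotonic deque: O(n) instead of a heap.
--     dq = deque([(0, nums[0])])  # (index, cost) pairs, costs strictly increasing
--     for i in range(1, len(nums)):
--         while dq[0][0] < i - k:
--             dq.popleft()
--         c = nums[i] + dq[0][1]
--         while dq and dq[-1][1] >= c:
--             dq.pop()
--         dq.append((i, c))
--     return dq[-1][1]
-- ===== Notes on version B (the rewrite author's own statement) =====
-- stated objective: faster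
-- what changed: The heap with lazy deletion (heapq plus a cost array filled as items are popped) is replaced by a monotonic deque sliding-window minimum: each DP cost is computed once and pushed/popped at most once, so no priority queue and no final drain are needed.
import Mathlib
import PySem

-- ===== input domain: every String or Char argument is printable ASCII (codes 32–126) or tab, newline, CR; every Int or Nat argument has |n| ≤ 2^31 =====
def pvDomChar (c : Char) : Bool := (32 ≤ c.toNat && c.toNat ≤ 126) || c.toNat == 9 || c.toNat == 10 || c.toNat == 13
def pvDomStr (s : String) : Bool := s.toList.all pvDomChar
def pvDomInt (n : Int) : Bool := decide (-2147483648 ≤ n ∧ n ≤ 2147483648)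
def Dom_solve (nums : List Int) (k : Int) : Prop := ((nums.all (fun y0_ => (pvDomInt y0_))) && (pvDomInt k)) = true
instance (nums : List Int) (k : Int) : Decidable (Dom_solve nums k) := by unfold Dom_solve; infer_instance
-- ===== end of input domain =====

-- B replaces A's heap-with-lazy-deletion by a monotonic-deque sliding-window minimum (O(n) instead of O(n log n)).


-- ===== PORT A =====
-- heapq has no PySem primitive, so the priority queue is ported by hand as a list kept sorted
-- ascending in Python's tuple order on QItem = (cost, index); Q[0] is the head, heappop drops the
-- head, heappush inserts in order.  This is exact for A: every QItem in the queue carries a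
-- distinct index, so the tuple order is a total strict order and the binary heap's root (Q[0])
-- and its pop sequence coincide with the sorted list's head and pop sequence on every input.
def qLt (a b : Int × Int) : Bool := a.1 < b.1 || (a.1 == b.1 && a.2 < b.2)

def qPush (q : List (Int × Int)) (x : Int × Int) : List (Int × Int) :=
  match q with
  | [] => [x]
  | y :: ys => if qLt x y then x :: y :: ys else y :: qPush ys x

-- the inner loop 'while Q and Q[0].index < i - k: cost[Q[0].index] = Q[0].cost; heapq.heappop(Q)'
def drainStale (bound : Int) : List (Int × Int) → List Int → List (Int × Int) × List Int
  | [], cost => ([], cost)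
  | (c, j) :: rest, cost =>
      if j < bound then drainStale bound rest (PySem.List.pySetD cost j c)
      else ((c, j) :: rest, cost)

-- the final loop 'while Q: cost[Q[0].index] = Q[0].cost; heapq.heappop(Q)'
def drainAll : List (Int × Int) → List Int → List Int
  | [], cost => cost
  | (c, j) :: rest, cost => drainAll rest (PySem.List.pySetD cost j c)

-- one iteration of 'for i, n in enumerate(nums[1:], start=1)' (p = (i, n));
-- 'Q[0].cost' on an empty queue raises IndexError in Python (excluded by Pre_): headD is a placeholder there
def stepA (k : Int) (st : List (Int × Int) × List Int) (p : Int × Int) : List (Int × Int) × List Int :=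
  let st' := drainStale (p.1 - k) st.1 st.2
  (qPush st'.1 (p.2 + (st'.1.headD (0, 0)).1, p.1), st'.2)

def solve (nums : List Int) (k : Int) : Int :=
  let q0 : List (Int × Int) := [((PySem.List.pyGet? nums 0).getD 0, 0)]
  let cost0 : List Int := nums.map (fun _ => 0)
  let st := (PySem.List.enumerate (PySem.List.slice nums (some 1) none) 1).foldl (stepA k) (q0, cost0)
  let cost := drainAll st.1 st.2
  (PySem.List.pyGet? cost (-1)).getD 0

-- ===== PORT B =====
-- 'while dq[0][0] < i - k: dq.popleft()'  (dq[0] on an empty deque raises in Python; excluded by Pre_)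
def popFrontB (bound : Int) : List (Int × Int) → List (Int × Int)
  | [] => []
  | (j, c) :: rest => if j < bound then popFrontB bound rest else (j, c) :: rest

-- 'while dq and dq[-1][1] >= c: dq.pop()', acting on the reversed deque
def popBackAux (c : Int) : List (Int × Int) → List (Int × Int)
  | [] => []
  | (j, v) :: rest => if c ≤ v then popBackAux c rest else (j, v) :: rest

-- one iteration of 'for i in range(1, len(nums))'; deque entries are (index, cost)
def stepB (nums : List Int) (k : Int) (dq : List (Int × Int)) (i : Int) : List (Int × Int) :=
  let dq1 := popFrontB (i - k) dq
  let c := (PySem.List.pyGet? nums i).getD 0 + (dq1.headD (0, 0)).2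
  (popBackAux c dq1.reverse).reverse ++ [(i, c)]

def solve_alt (nums : List Int) (k : Int) : Int :=
  let dq0 : List (Int × Int) := [(0, (PySem.List.pyGet? nums 0).getD 0)]
  let dq := (PySem.List.pyRange 1 (nums.length : Int) 1).foldl (stepB nums k) dq0
  (dq.getLast?.getD (0, 0)).2

-- ===== PRECONDITION & SPEC =====
-- Pre_ excludes exactly the inputs on which A raises IndexError: the empty list (nums[0]),
-- and k ≤ 0 with at least two elements (the queue is fully drained and Q[0] raises); B raises there too.
def Pre_solve (nums : List Int) (k : Int) : Prop := nums ≠ [] ∧ (1 ≤ k ∨ nums.length = 1)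
instance (nums : List Int) (k : Int) : Decidable (Pre_solve nums k) := by unfold Pre_solve; infer_instance
def pvWitness_solve : List Int × Int := ([3, -1, 4, -5, 2, 6], 2)

def Spec_solve (nums : List Int) (k : Int) (out : Int) : Prop := out = solve_alt nums k
instance (nums : List Int) (k : Int) (out : Int) : Decidable (Spec_solve nums k out) := by unfold Spec_solve; infer_instance

-- ===== CLAIM (what is proved, stated in full; the proofs are below) =====
def Claim_equal_solve : Prop := ∀ (nums : List Int) (k : Int), Dom_solve nums k → Pre_solve nums k → Spec_solve nums k (solve nums k)

-- ===== LEMMAS AND PROOFS =====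

-- min(l) as a running fold (Python's min of a nonempty list)
def listMin : List Int → Int
  | [] => 0
  | x :: xs => xs.foldl min x

-- lower end of the window of indices feeding cost i: max(0, i-k)
def winLo (i : Nat) (k : Int) : Nat := ((i : Int) - k).toNat

-- the DP table: dsAux nums k i = [cost 0, …, cost i] of the bunny-hop recurrence
def dsAux (nums : List Int) (k : Int) : Nat → List Int
  | 0 => [nums.headD 0]
  | i + 1 =>
      dsAux nums k i ++ [nums.getD (i + 1) 0 + listMin ((dsAux nums k i).drop (winLo (i + 1) k))]

-- the DP value at index j
def Dv (nums : List Int) (k : Int) (j : Nat) : Int := (dsAux nums k j).getD j 0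

lemma listMin_le {l : List Int} {y : Int} (h : y ∈ l) : listMin l ≤ y := by
  cases l with
  | nil => cases h
  | cons x xs =>
      rcases List.mem_cons.mp h with rfl | hy
      · exact (PySem.List.foldl_min_le xs y).1
      · exact (PySem.List.foldl_min_le xs x).2 y hy

lemma listMin_mem {l : List Int} (h : l ≠ []) : listMin l ∈ l := by
  cases l with
  | nil => exact absurd rfl h
  | cons x xs =>
      rcases PySem.List.foldl_min_mem xs x with h1 | h1
      · simp [listMin, h1]
      · exact List.mem_cons_of_mem _ h1

lemma dsAux_length (nums : List Int) (k : Int) (i : Nat) : (dsAux nums k i).length = i + 1 := by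
  induction i with
  | zero => rfl
  | succ i ih => simp [dsAux, ih]

lemma Dv_succ (nums : List Int) (k : Int) (i : Nat) :
    Dv nums k (i + 1) = nums.getD (i + 1) 0 + listMin ((dsAux nums k i).drop (winLo (i + 1) k)) := by
  show (dsAux nums k i ++ [_]).getD (i + 1) 0 = _
  rw [List.getD, List.getElem?_append_right (by rw [dsAux_length])]
  simp [dsAux_length]

lemma dsAux_map (nums : List Int) (k : Int) (i : Nat) :
    dsAux nums k i = (List.range (i + 1)).map (Dv nums k) := by
  induction i with
  | zero => simp [dsAux, Dv, List.range_succ]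
  | succ i ih =>
      rw [List.range_succ, List.map_append, ← ih]
      show dsAux nums k i ++ [_] = _
      rw [← Dv_succ]
      simp

lemma drop_range_eq (n m : Nat) : (List.range n).drop m = List.range' m (n - m) := by
  rw [List.range_eq_range', List.drop_range']; simp

-- the window minimum is ≤ every window entry
lemma wmin_le (nums : List Int) (k : Int) (i j : Nat) (hlo : winLo (i + 1) k ≤ j) (hj : j ≤ i) :
    listMin ((dsAux nums k i).drop (winLo (i + 1) k)) ≤ Dv nums k j := by
  apply listMin_le
  rw [dsAux_map, ← List.map_drop, drop_range_eq]
  exact List.mem_map_of_mem (by rw [List.mem_range'_1]; omega)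

-- the window minimum is attained at some window index
lemma wmin_mem (nums : List Int) (k : Int) (i : Nat) (h : winLo (i + 1) k ≤ i) :
    ∃ j : Nat, winLo (i + 1) k ≤ j ∧ j ≤ i ∧
      listMin ((dsAux nums k i).drop (winLo (i + 1) k)) = Dv nums k j := by
  have hne : (dsAux nums k i).drop (winLo (i + 1) k) ≠ [] := by
    apply List.ne_nil_of_length_pos
    rw [List.length_drop, dsAux_length]; omega
  rw [dsAux_map, ← List.map_drop, drop_range_eq] at hne ⊢
  have hm := listMin_mem hne
  rcases List.mem_map.mp hm with ⟨j', hj', hval⟩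
  rw [List.mem_range'_1] at hj'
  clear hm hne
  exact ⟨j', by omega, by omega, hval.symm⟩

-- ---------- B side: the monotonic deque ----------

-- invariant at the top of iteration i of B's loop: the deque is strictly increasing in both
-- index and cost, holds pairs (j, Dv j) with j < i, ends with (i-1, Dv (i-1)), and every index
-- still inside (or right of) the window is dominated by some deque entry at or after it
def InvB (nums : List Int) (k : Int) (i : Nat) (dq : List (Int × Int)) : Prop :=
  dq.Pairwise (fun p q => p.1 < q.1 ∧ p.2 < q.2) ∧
  (∀ p ∈ dq, ∃ j : Nat, p.1 = (j : Int) ∧ j < i ∧ p.2 = Dv nums k j) ∧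
  dq.getLast? = some ((i : Int) - 1, Dv nums k (i - 1)) ∧
  (∀ j : Nat, j < i → (i : Int) - 1 - k ≤ (j : Int) →
    ∃ p ∈ dq, (j : Int) ≤ p.1 ∧ p.2 ≤ Dv nums k j)

lemma popFrontB_sublist (b : Int) (l : List (Int × Int)) : (popFrontB b l).Sublist l := by
  induction l with
  | nil => simp [popFrontB]
  | cons p rest ih =>
      obtain ⟨j, c⟩ := p
      simp only [popFrontB]
      split
      · exact ih.trans (List.sublist_cons_self _ _)
      · exact List.Sublist.refl _

lemma popFrontB_mem_ge (b : Int) {l : List (Int × Int)}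
    (hpw : l.Pairwise (fun p q => p.1 < q.1)) :
    ∀ p ∈ popFrontB b l, b ≤ p.1 := by
  induction l with
  | nil => simp [popFrontB]
  | cons y rest ih =>
      obtain ⟨j, c⟩ := y
      simp only [popFrontB]
      split
      · exact ih hpw.tail
      · intro p hp
        rcases List.mem_cons.mp hp with rfl | hp
        · simpa using by omega
        · have := (List.pairwise_cons.mp hpw).1 p hp
          simp at this ⊢; omega

lemma popFrontB_mem_of (b : Int) {l : List (Int × Int)} {p : Int × Int}
    (hp : p ∈ l) (hb : b ≤ p.1) : p ∈ popFrontB b l := by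
  induction l with
  | nil => cases hp
  | cons y rest ih =>
      obtain ⟨j, c⟩ := y
      simp only [popFrontB]
      split
      · rcases List.mem_cons.mp hp with rfl | hp
        · simp at *; omega
        · exact ih hp
      · exact hp

lemma popBackAux_sublist (c : Int) (l : List (Int × Int)) : (popBackAux c l).Sublist l := by
  induction l with
  | nil => simp [popBackAux]
  | cons y rest ih =>
      obtain ⟨j, v⟩ := y
      simp only [popBackAux]
      split
      · exact ih.trans (List.sublist_cons_self _ _)
      · exact List.Sublist.refl _

lemma popBackAux_mem_or (c : Int) {l : List (Int × Int)} :
    ∀ p ∈ l, p ∈ popBackAux c l ∨ c ≤ p.2 := by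
  induction l with
  | nil => simp
  | cons y rest ih =>
      obtain ⟨j, v⟩ := y
      intro p hp
      simp only [popBackAux]
      split
      · rcases List.mem_cons.mp hp with rfl | hp
        · right; assumption
        · exact ih p hp
      · left; exact hp

lemma popBackAux_mem_lt (c : Int) {l : List (Int × Int)}
    (hpw : l.Pairwise (fun p q => q.2 < p.2)) :
    ∀ p ∈ popBackAux c l, p.2 < c := by
  induction l with
  | nil => simp [popBackAux]
  | cons y rest ih =>
      obtain ⟨j, v⟩ := y
      simp only [popBackAux]
      split
      · exact ih hpw.tail
      · intro p hp
        rcases List.mem_cons.mp hp with rfl | hp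
        · simp only; omega
        · have := (List.pairwise_cons.mp hpw).1 p hp
          omega

lemma invB_step (nums : List Int) (k : Int) (i : Nat) (hk : 1 ≤ k) (h1 : 1 ≤ i)
    (hin : i < nums.length) {dq : List (Int × Int)} (H : InvB nums k i dq) :
    InvB nums k (i + 1) (stepB nums k dq (i : Int)) := by
  obtain ⟨hpw, hform, hlast, hdom⟩ := H
  obtain ⟨m, rfl⟩ : ∃ m, i = m + 1 := ⟨i - 1, by omega⟩
  simp only [stepB]
  set b : Int := ((m + 1 : Nat) : Int) - k with hb
  set dq1 := popFrontB b dq with hdq1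
  have hsub1 : dq1.Sublist dq := popFrontB_sublist b dq
  have hpw1 : dq1.Pairwise (fun p q => p.1 < q.1 ∧ p.2 < q.2) := hpw.sublist hsub1
  have hlast' : dq.getLast? = some ((m : Int), Dv nums k m) := by
    have h1 : ((m + 1 : Nat) : Int) - 1 = (m : Int) := by push_cast; ring
    have h2 : m + 1 - 1 = m := rfl
    rw [hlast, h1, h2]
  have hmemL : ((m : Int), Dv nums k m) ∈ dq := List.mem_of_getLast? hlast'
  have hmemL1 : ((m : Int), Dv nums k m) ∈ dq1 :=
    popFrontB_mem_of b hmemL (by simp only; omega)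
  obtain ⟨p0, t, hcons⟩ := List.exists_cons_of_ne_nil (List.ne_nil_of_mem hmemL1)
  have hp0mem : p0 ∈ dq1 := by rw [hcons]; exact List.mem_cons_self
  have hp0dq : p0 ∈ dq := hsub1.subset hp0mem
  obtain ⟨j0, hj0eq, hj0lt, hj0val⟩ := hform p0 hp0dq
  have hge : b ≤ p0.1 := popFrontB_mem_ge b (hpw.imp (fun h => h.1)) p0 hp0mem
  have hmin : ∀ p ∈ dq1, p0.2 ≤ p.2 := by
    intro p hp
    rw [hcons] at hp
    rcases List.mem_cons.mp hp with rfl | hp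
    · exact le_refl _
    · exact ((List.pairwise_cons.mp (hcons ▸ hpw1)).1 p hp).2.le
  -- the head of the popped deque carries the window minimum
  have hlo_le : winLo (m + 1) k ≤ j0 := by
    rw [hj0eq] at hge; unfold winLo; omega
  have hwle : listMin ((dsAux nums k m).drop (winLo (m + 1) k)) ≤ p0.2 := by
    rw [hj0val]; exact wmin_le nums k m j0 hlo_le (by omega)
  have hlom : winLo (m + 1) k ≤ m := by unfold winLo; omega
  obtain ⟨j1, hj1lo, hj1m, hj1val⟩ := wmin_mem nums k m hlom
  have hlew : p0.2 ≤ listMin ((dsAux nums k m).drop (winLo (m + 1) k)) := by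
    obtain ⟨p, hpdq, hple, hpval⟩ :=
      hdom j1 (by omega) (by unfold winLo at hj1lo; push_cast; omega)
    have hp1 : p ∈ dq1 := popFrontB_mem_of b hpdq
      (by unfold winLo at hj1lo; omega)
    calc p0.2 ≤ p.2 := hmin p hp1
      _ ≤ Dv nums k j1 := hpval
      _ = _ := hj1val.symm
  have hp0w : p0.2 = listMin ((dsAux nums k m).drop (winLo (m + 1) k)) :=
    le_antisymm hlew hwle
  -- the appended cost is the DP value at i
  set c : Int := (PySem.List.pyGet? nums ((m + 1 : Nat) : Int)).getD 0 + (dq1.headD (0, 0)).2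
    with hcdef
  have hc : c = Dv nums k (m + 1) := by
    rw [Dv_succ, hcdef, hcons]
    have : (PySem.List.pyGet? nums ((m + 1 : Nat) : Int)).getD 0 = nums.getD (m + 1) 0 := by
      rw [PySem.List.pyGet?_natCast, List.getD_eq_getElem?_getD]
    rw [this, List.headD_cons, hp0w]
  -- the kept part of the deque
  set kept := (popBackAux c dq1.reverse).reverse with hkept
  have hkeptsub : kept.Sublist dq1 := by
    have := (popBackAux_sublist c dq1.reverse).reverse
    simpa using this
  have hkeptpw := hpw1.sublist hkeptsub
  have hkeptlt : ∀ p ∈ kept, p.2 < c := by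
    intro p hp
    refine popBackAux_mem_lt c ?_ p (by rw [hkept, List.mem_reverse] at hp; exact hp)
    exact (List.pairwise_reverse).mpr (hpw1.imp (fun h => h.2))
  have hkeptmem_or : ∀ p ∈ dq1, p ∈ kept ∨ c ≤ p.2 := by
    intro p hp
    rcases popBackAux_mem_or c (l := dq1.reverse) p (by simpa using hp) with h | h
    · left; rw [hkept, List.mem_reverse]; exact h
    · right; exact h
  have hkeptdq : ∀ p ∈ kept, p ∈ dq := fun p hp => hsub1.subset (hkeptsub.subset hp)
  refine ⟨?_, ?_, ?_, ?_⟩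
  · -- pairwise
    rw [List.pairwise_append]
    refine ⟨hkeptpw, List.pairwise_singleton _ _, ?_⟩
    intro p hp q hq
    rw [List.mem_singleton] at hq
    subst hq
    obtain ⟨j, hjeq, hjlt, _⟩ := hform p (hkeptdq p hp)
    exact ⟨by rw [hjeq]; simp only; exact_mod_cast by omega, hkeptlt p hp⟩
  · -- shape
    intro p hp
    rcases List.mem_append.mp hp with hp | hp
    · obtain ⟨j, hjeq, hjlt, hjval⟩ := hform p (hkeptdq p hp)
      exact ⟨j, hjeq, by omega, hjval⟩
    · rw [List.mem_singleton] at hp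
      subst hp
      exact ⟨m + 1, rfl, by omega, hc⟩
  · -- last entry
    rw [List.getLast?_concat]
    have h1 : ((m + 1 + 1 : Nat) : Int) - 1 = ((m + 1 : Nat) : Int) := by push_cast; ring
    have h2 : m + 1 + 1 - 1 = m + 1 := rfl
    rw [h1, h2, hc]
  · -- domination
    intro j hj hjb
    by_cases hji : j = m + 1
    · subst hji
      exact ⟨((m + 1 : Nat), c), List.mem_append_right _ (List.mem_singleton_self _),
        le_refl _, by rw [hc]⟩
    · obtain ⟨p, hpdq, hple, hpval⟩ := hdom j (by omega) (by push_cast at hjb ⊢; omega)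
      have hp1 : p ∈ dq1 := popFrontB_mem_of b hpdq (by push_cast at hjb; omega)
      rcases hkeptmem_or p hp1 with hkp | hcp
      · exact ⟨p, List.mem_append_left _ hkp, hple, hpval⟩
      · refine ⟨((m + 1 : Nat), c), List.mem_append_right _ (List.mem_singleton_self _),
          by simp only; exact_mod_cast by omega, le_trans hcp hpval⟩

lemma invB_fold (nums : List Int) (k : Int) (hne : nums ≠ []) :
    ∀ t : Nat, (t = 0 ∨ 1 ≤ k) → t + 1 ≤ nums.length →
      InvB nums k (t + 1)
        ((PySem.List.pyRange 1 ((t : Int) + 1) 1).foldl (stepB nums k)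
          [(0, (PySem.List.pyGet? nums 0).getD 0)]) := by
  have hd0 : (PySem.List.pyGet? nums 0).getD 0 = Dv nums k 0 := by
    cases nums with
    | nil => exact absurd rfl hne
    | cons x xs => simp [Dv, dsAux]
  intro t hk ht
  induction t with
  | zero =>
      rw [PySem.List.pyRange_one_eq_nil (by norm_num)]
      simp only [List.foldl_nil]
      refine ⟨List.pairwise_singleton _ _, ?_, by simp [hd0], ?_⟩
      · intro p hp
        rw [List.mem_singleton] at hp
        subst hp
        exact ⟨0, rfl, by omega, hd0⟩
      · intro j hj _
        have : j = 0 := by omega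
        subst this
        exact ⟨(0, (PySem.List.pyGet? nums 0).getD 0), List.mem_singleton_self _,
          le_refl _, by rw [hd0]⟩
  | succ t ih =>
      have hk' : 1 ≤ k := by omega
      have hsplit : PySem.List.pyRange 1 (((t + 1 : Nat) : Int) + 1) 1 =
          PySem.List.pyRange 1 ((t : Int) + 1) 1 ++ [(t : Int) + 1] := by
        have : ((t + 1 : Nat) : Int) + 1 = ((t : Int) + 1) + 1 := by push_cast; ring
        rw [this, PySem.List.pyRange_one_succ_right (by omega)]
      rw [hsplit, List.foldl_append]
      have hprev := ih (by omega) (by omega)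
      have hcast : ((t : Int) + 1) = ((t + 1 : Nat) : Int) := by push_cast; ring
      simp only [List.foldl_cons, List.foldl_nil, hcast]
      exact invB_step nums k (t + 1) hk' (by omega) (by omega) hprev

lemma solve_alt_eq (nums : List Int) (k : Int) (hne : nums ≠ [])
    (hpre : 1 ≤ k ∨ nums.length = 1) :
    solve_alt nums k = Dv nums k (nums.length - 1) := by
  have hn : 1 ≤ nums.length := List.length_pos_iff.mpr hne
  have hk' : nums.length - 1 = 0 ∨ 1 ≤ k := by
    rcases hpre with h | h
    · exact Or.inr h
    · exact Or.inl (by omega)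
  have H := invB_fold nums k hne (nums.length - 1) hk' (by omega)
  obtain ⟨_, _, hlast, _⟩ := H
  simp only [solve_alt]
  have hcast : ((nums.length - 1 : Nat) : Int) + 1 = (nums.length : Int) := by omega
  rw [← hcast, hlast]
  simp

-- ---------- A side: the sorted queue with lazy deletion ----------

-- Python's tuple order on QItem = (cost, index), as a Prop
def qlt' (p r : Int × Int) : Prop := p.1 < r.1 ∨ (p.1 = r.1 ∧ p.2 < r.2)

lemma qLt_iff {p r : Int × Int} : qLt p r = true ↔ qlt' p r := by
  simp [qLt, qlt']

lemma qlt'_trans {a b c : Int × Int} (h1 : qlt' a b) (h2 : qlt' b c) : qlt' a c := by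
  unfold qlt' at *; omega

-- invariant at the top of iteration i of A's loop: the queue is sorted, holds pairs (Dv j, j)
-- with j < i, still contains every index at or right of the previous window, and the cost array
-- records Dv j exactly for the indices already popped
def InvA (nums : List Int) (k : Int) (i : Nat) (st : List (Int × Int) × List Int) : Prop :=
  st.1.Pairwise qlt' ∧
  (∀ p ∈ st.1, ∃ j : Nat, p.2 = (j : Int) ∧ j < i ∧ p.1 = Dv nums k j) ∧
  (∀ j : Nat, j < i → (i : Int) - 1 - k ≤ (j : Int) → (Dv nums k j, (j : Int)) ∈ st.1) ∧
  st.2.length = nums.length ∧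
  (∀ j : Nat, j < nums.length →
    st.2.getD j 0 = if (∃ p ∈ st.1, p.2 = (j : Int)) ∨ i ≤ j then 0 else Dv nums k j)

lemma qPush_mem {q : List (Int × Int)} {x p : Int × Int} :
    p ∈ qPush q x ↔ p = x ∨ p ∈ q := by
  induction q with
  | nil => simp [qPush]
  | cons y ys ih =>
      simp only [qPush]
      split
      · simp
      · simp [ih]
        tauto

lemma qPush_pairwise {q : List (Int × Int)} {x : Int × Int} (hq : q.Pairwise qlt')
    (hx : ∀ p ∈ q, p.2 ≠ x.2) : (qPush q x).Pairwise qlt' := by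
  induction q with
  | nil => simp [qPush]
  | cons y ys ih =>
      obtain ⟨hhead, htail⟩ := List.pairwise_cons.mp hq
      simp only [qPush]
      split
      · rename_i hlt
        rw [qLt_iff] at hlt
        refine List.pairwise_cons.mpr ⟨?_, hq⟩
        intro p hp
        rcases List.mem_cons.mp hp with rfl | hp
        · exact hlt
        · exact qlt'_trans hlt (hhead p hp)
      · rename_i hnlt
        rw [qLt_iff] at hnlt
        have hyx : qlt' y x := by
          have := hx y List.mem_cons_self
          unfold qlt' at *; omega
        refine List.pairwise_cons.mpr ⟨?_, ih htail (fun p hp => hx p (List.mem_cons_of_mem _ hp))⟩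
        intro p hp
        rcases qPush_mem.mp hp with rfl | hp
        · exact hyx
        · exact hhead p hp

lemma drainStale_sublist (b : Int) :
    ∀ (q : List (Int × Int)) (cost : List Int), ((drainStale b q cost).1).Sublist q := by
  intro q
  induction q with
  | nil => intro cost; simp [drainStale]
  | cons y rest ih =>
      intro cost
      obtain ⟨c, j⟩ := y
      simp only [drainStale]
      split
      · exact (ih _).trans (List.sublist_cons_self _ _)
      · exact List.Sublist.refl _

lemma drainStale_mem_or (b : Int) :
    ∀ (q : List (Int × Int)) (cost : List Int), ∀ p ∈ q,
      p ∈ (drainStale b q cost).1 ∨ p.2 < b := by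
  intro q
  induction q with
  | nil => simp
  | cons y rest ih =>
      intro cost p hp
      obtain ⟨c, j⟩ := y
      simp only [drainStale]
      split
      · rcases List.mem_cons.mp hp with rfl | hp
        · right; assumption
        · exact ih _ p hp
      · left; exact hp

lemma drainStale_head_ge (b : Int) :
    ∀ (q : List (Int × Int)) (cost : List Int) (c j : Int) (rest : List (Int × Int)),
      (drainStale b q cost).1 = (c, j) :: rest → b ≤ j := by
  intro q
  induction q with
  | nil => intro cost c j rest h; simp [drainStale] at h
  | cons y t ih =>
      intro cost c j rest h
      obtain ⟨c', j'⟩ := y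
      simp only [drainStale] at h
      split at h
      · exact ih _ c j rest h
      · rename_i hn
        simp only [List.cons.injEq, Prod.mk.injEq] at h
        obtain ⟨⟨-, hj⟩, -⟩ := h
        omega

-- cost-array bookkeeping through the stale-pop loop
lemma drainStale_cost (nums : List Int) (k : Int) (i : Nat) (b : Int) :
    ∀ (q : List (Int × Int)) (cost : List Int),
      q.Pairwise (fun p r : Int × Int => p.2 ≠ r.2) →
      (∀ p ∈ q, ∃ j : Nat, p.2 = (j : Int) ∧ j < i ∧ p.1 = Dv nums k j) →
      cost.length = nums.length →
      (∀ j : Nat, j < nums.length →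
        cost.getD j 0 = if (∃ p ∈ q, p.2 = (j : Int)) ∨ i ≤ j then 0 else Dv nums k j) →
      (drainStale b q cost).2.length = nums.length ∧
      (∀ j : Nat, j < nums.length →
        (drainStale b q cost).2.getD j 0 =
          if (∃ p ∈ (drainStale b q cost).1, p.2 = (j : Int)) ∨ i ≤ j then 0
          else Dv nums k j) := by
  intro q
  induction q with
  | nil => intro cost _ _ hlen hcost; exact ⟨hlen, hcost⟩
  | cons y rest ih =>
      intro cost hnd hform hlen hcost
      obtain ⟨c, jI⟩ := y
      obtain ⟨j0, hj0eq, hj0lt, hj0val⟩ := hform (c, jI) List.mem_cons_self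
      simp only at hj0eq hj0val
      subst hj0eq hj0val
      simp only [drainStale]
      split
      · -- pop (Dv j0, j0), write cost[j0]
        refine ih _ hnd.tail (fun p hp => hform p (List.mem_cons_of_mem _ hp)) ?_ ?_
        · simp [hlen]
        · intro j hj
          rw [PySem.List.pySetD_natCast]
          by_cases hjj : j = j0
          · subst hjj
            rw [List.getD_eq_getElem?_getD, List.getElem?_set_self (by omega),
              Option.getD_some]
            have hnr : ¬ ((∃ p ∈ rest, p.2 = (j : Int)) ∨ i ≤ j) := by
              push Not
              refine ⟨fun p hp hpj => ?_, by omega⟩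
              have := (List.pairwise_cons.mp hnd).1 p hp
              simp only at this
              exact this (hpj ▸ rfl)
            rw [if_neg hnr]
          · rw [List.getD_eq_getElem?_getD, List.getElem?_set_ne (by omega),
              ← List.getD_eq_getElem?_getD, hcost j hj]
            have : ((∃ p ∈ (Dv nums k j0, (j0 : Int)) :: rest, p.2 = (j : Int)) ∨ i ≤ j) ↔
                ((∃ p ∈ rest, p.2 = (j : Int)) ∨ i ≤ j) := by
              simp only [List.mem_cons]
              constructor
              · rintro (⟨p, rfl | hp, hpj⟩ | h)
                · exact absurd (by exact_mod_cast hpj.symm) (by simpa using hjj)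
                · exact Or.inl ⟨p, hp, hpj⟩
                · exact Or.inr h
              · rintro (⟨p, hp, hpj⟩ | h)
                · exact Or.inl ⟨p, Or.inr hp, hpj⟩
                · exact Or.inr h
            rw [if_congr this rfl rfl]
      · exact ⟨hlen, hcost⟩

-- cost-array bookkeeping through the final drain loop
lemma drainAll_cost (nums : List Int) (k : Int) :
    ∀ (q : List (Int × Int)) (cost : List Int),
      q.Pairwise (fun p r : Int × Int => p.2 ≠ r.2) →
      (∀ p ∈ q, ∃ j : Nat, p.2 = (j : Int) ∧ j < nums.length ∧ p.1 = Dv nums k j) →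
      cost.length = nums.length →
      (∀ j : Nat, j < nums.length →
        cost.getD j 0 = if (∃ p ∈ q, p.2 = (j : Int)) ∨ nums.length ≤ j then 0
          else Dv nums k j) →
      (drainAll q cost).length = nums.length ∧
      (∀ j : Nat, j < nums.length → (drainAll q cost).getD j 0 = Dv nums k j) := by
  intro q
  induction q with
  | nil =>
      intro cost _ _ hlen hcost
      refine ⟨hlen, fun j hj => ?_⟩
      rw [drainAll, hcost j hj, if_neg]
      push Not
      exact ⟨by simp, by omega⟩
  | cons y rest ih =>
      intro cost hnd hform hlen hcost
      obtain ⟨c, jI⟩ := y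
      obtain ⟨j0, hj0eq, hj0lt, hj0val⟩ := hform (c, jI) List.mem_cons_self
      simp only at hj0eq hj0val
      subst hj0eq hj0val
      simp only [drainAll]
      refine ih _ hnd.tail (fun p hp => hform p (List.mem_cons_of_mem _ hp)) ?_ ?_
      · simp [hlen]
      · intro j hj
        rw [PySem.List.pySetD_natCast]
        by_cases hjj : j = j0
        · subst hjj
          rw [List.getD_eq_getElem?_getD, List.getElem?_set_self (by omega), Option.getD_some]
          have hnr : ¬ ((∃ p ∈ rest, p.2 = (j : Int)) ∨ nums.length ≤ j) := by
            push Not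
            refine ⟨fun p hp hpj => ?_, by omega⟩
            have := (List.pairwise_cons.mp hnd).1 p hp
            simp only at this
            exact this (hpj ▸ rfl)
          rw [if_neg hnr]
        · rw [List.getD_eq_getElem?_getD, List.getElem?_set_ne (by omega),
            ← List.getD_eq_getElem?_getD, hcost j hj]
          have : ((∃ p ∈ (Dv nums k j0, (j0 : Int)) :: rest, p.2 = (j : Int)) ∨
              nums.length ≤ j) ↔
              ((∃ p ∈ rest, p.2 = (j : Int)) ∨ nums.length ≤ j) := by
            simp only [List.mem_cons]
            constructor
            · rintro (⟨p, rfl | hp, hpj⟩ | h)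
              · exact absurd (by exact_mod_cast hpj.symm) (by simpa using hjj)
              · exact Or.inl ⟨p, hp, hpj⟩
              · exact Or.inr h
            · rintro (⟨p, hp, hpj⟩ | h)
              · exact Or.inl ⟨p, Or.inr hp, hpj⟩
              · exact Or.inr h
          rw [if_congr this rfl rfl]

-- distinct indices in the queue, from sortedness plus the (Dv j, j) shape
lemma invA_nodup {nums : List Int} {k : Int} {i : Nat} {q : List (Int × Int)}
    (hpw : q.Pairwise qlt')
    (hform : ∀ p ∈ q, ∃ j : Nat, p.2 = (j : Int) ∧ j < i ∧ p.1 = Dv nums k j) :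
    q.Pairwise (fun p r : Int × Int => p.2 ≠ r.2) := by
  apply List.Pairwise.imp_of_mem _ hpw
  intro p r hp hr hlt
  obtain ⟨j1, h1, _, hv1⟩ := hform p hp
  obtain ⟨j2, h2, _, hv2⟩ := hform r hr
  intro heq
  have : j1 = j2 := by omega
  subst this
  have hpr : p = r := Prod.ext (hv1.trans hv2.symm) (h1.trans h2.symm)
  subst hpr
  unfold qlt' at hlt
  omega

lemma invA_step (nums : List Int) (k : Int) (m : Nat) (hk : 1 ≤ k)
    (_hin : m + 1 < nums.length) {st : List (Int × Int) × List Int}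
    (H : InvA nums k (m + 1) st) :
    InvA nums k (m + 2) (stepA k st (((m + 1 : Nat) : Int), nums.getD (m + 1) 0)) := by
  obtain ⟨q, cost⟩ := st
  obtain ⟨hpw, hform, hwin, hlen, hcost⟩ := H
  simp only at hpw hform hwin hlen hcost
  simp only [stepA]
  set b : Int := ((m + 1 : Nat) : Int) - k with hb
  set res := drainStale b q cost with hres
  have hsub : res.1.Sublist q := drainStale_sublist b q cost
  have hpw1 : res.1.Pairwise qlt' := hpw.sublist hsub
  have hnd : q.Pairwise (fun p r : Int × Int => p.2 ≠ r.2) := invA_nodup hpw hform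
  have hcost' := drainStale_cost nums k (m + 1) b q cost hnd hform hlen hcost
  have hsurv : ∀ j : Nat, j < m + 1 → b ≤ (j : Int) → (Dv nums k j, (j : Int)) ∈ res.1 := by
    intro j hj hbj
    have hmem : (Dv nums k j, (j : Int)) ∈ q := hwin j hj (by push_cast at hbj ⊢; omega)
    rcases drainStale_mem_or b q cost _ hmem with h | h
    · exact h
    · simp only at h; omega
  have hmmem : (Dv nums k m, (m : Int)) ∈ res.1 :=
    hsurv m (by omega) (by omega)
  obtain ⟨p0, t, hcons⟩ := List.exists_cons_of_ne_nil (List.ne_nil_of_mem hmmem)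
  have hp0mem : p0 ∈ res.1 := hcons ▸ List.mem_cons_self
  obtain ⟨j0, hj0eq, hj0lt, hj0val⟩ := hform p0 (hsub.subset hp0mem)
  have hge : b ≤ p0.2 := by
    refine drainStale_head_ge b q cost p0.1 p0.2 t ?_
    rw [hcons]
  have hmin : ∀ p ∈ res.1, p0.1 ≤ p.1 := by
    intro p hp
    rw [hcons] at hp
    rcases List.mem_cons.mp hp with rfl | hp
    · exact le_refl _
    · have := (List.pairwise_cons.mp (hcons ▸ hpw1)).1 p hp
      unfold qlt' at this; omega
  have hlo_le : winLo (m + 1) k ≤ j0 := by rw [hj0eq] at hge; unfold winLo; omega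
  have hwle : listMin ((dsAux nums k m).drop (winLo (m + 1) k)) ≤ p0.1 := by
    rw [hj0val]; exact wmin_le nums k m j0 hlo_le (by omega)
  obtain ⟨j1, hj1lo, hj1m, hj1val⟩ := wmin_mem nums k m (by unfold winLo; omega)
  have hlew : p0.1 ≤ listMin ((dsAux nums k m).drop (winLo (m + 1) k)) := by
    have hmem1 : (Dv nums k j1, (j1 : Int)) ∈ res.1 :=
      hsurv j1 (by omega) (by unfold winLo at hj1lo; omega)
    calc p0.1 ≤ Dv nums k j1 := hmin _ hmem1
      _ = _ := hj1val.symm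
  have hp0w : p0.1 = listMin ((dsAux nums k m).drop (winLo (m + 1) k)) :=
    le_antisymm hlew hwle
  have hx : nums.getD (m + 1) 0 + (res.1.headD (0, 0)).1 = Dv nums k (m + 1) := by
    rw [hcons, List.headD_cons, Dv_succ, hp0w]
  refine ⟨?_, ?_, ?_, hcost'.1, ?_⟩
  · -- pairwise
    apply qPush_pairwise hpw1
    intro p hp
    obtain ⟨j, hjeq, hjlt, _⟩ := hform p (hsub.subset hp)
    simp only [hjeq]
    exact_mod_cast by omega
  · -- shape
    intro p hp
    rcases qPush_mem.mp hp with rfl | hp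
    · exact ⟨m + 1, rfl, by omega, hx⟩
    · obtain ⟨j, hjeq, hjlt, hjval⟩ := hform p (hsub.subset hp)
      exact ⟨j, hjeq, by omega, hjval⟩
  · -- window
    intro j hj hjb
    by_cases hji : j = m + 1
    · subst hji
      apply qPush_mem.mpr
      left
      exact Prod.ext hx.symm rfl
    · exact qPush_mem.mpr (Or.inr (hsurv j (by omega) (by push_cast at hjb ⊢; omega)))
  · -- cost array
    intro j hj
    rw [hcost'.2 j hj]
    refine if_congr ?_ rfl rfl
    by_cases hji : j = m + 1
    · subst hji
      constructor
      · intro _; exact Or.inl ⟨_, qPush_mem.mpr (Or.inl rfl), rfl⟩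
      · intro _; exact Or.inr (by omega)
    · constructor
      · rintro (⟨p, hp, hpj⟩ | h)
        · exact Or.inl ⟨p, qPush_mem.mpr (Or.inr hp), hpj⟩
        · exact Or.inr (by omega)
      · rintro (⟨p, hp, hpj⟩ | h)
        · rcases qPush_mem.mp hp with rfl | hp
          · refine absurd (?_ : m + 1 = j) (by omega)
            simp only at hpj
            exact_mod_cast hpj
          · exact Or.inl ⟨p, hp, hpj⟩
        · exact Or.inr (by omega)

lemma invA_fold (nums : List Int) (k : Int) (hne : nums ≠ []) :
    ∀ t : Nat, (t = 0 ∨ 1 ≤ k) → t + 1 ≤ nums.length →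
      InvA nums k (t + 1)
        (((PySem.List.enumerate nums.tail 1).take t).foldl (stepA k)
          ([((PySem.List.pyGet? nums 0).getD 0, 0)], nums.map (fun _ => 0))) := by
  have hd0 : (PySem.List.pyGet? nums 0).getD 0 = Dv nums k 0 := by
    cases nums with
    | nil => exact absurd rfl hne
    | cons x xs => simp [Dv, dsAux]
  have hc0 : ∀ j : Nat, (nums.map (fun _ => (0 : Int))).getD j 0 = 0 := by
    intro j
    rw [List.getD_eq_getElem?_getD, List.getElem?_map]
    cases nums[j]? <;> simp
  obtain ⟨x, xs, rfl⟩ : ∃ x xs, nums = x :: xs := by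
    cases nums with
    | nil => exact absurd rfl hne
    | cons x xs => exact ⟨x, xs, rfl⟩
  intro t hk ht
  induction t with
  | zero =>
      simp only [List.take_zero, List.foldl_nil]
      refine ⟨List.pairwise_singleton _ _, ?_, ?_, by simp, ?_⟩
      · intro p hp
        rw [List.mem_singleton] at hp
        subst hp
        exact ⟨0, rfl, by omega, hd0⟩
      · intro j hj _
        have : j = 0 := by omega
        subst this
        rw [hd0]
        exact List.mem_singleton_self _
      · intro j hj
        rw [hc0 j, if_pos]
        by_cases hj0 : j = 0
        · subst hj0
          exact Or.inl ⟨_, List.mem_singleton_self _, rfl⟩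
        · exact Or.inr (by omega)
  | succ t ih =>
      have hk' : 1 ≤ k := by omega
      have hlt : t < xs.length := by
        simp only [List.length_cons] at ht; omega
      have htake : (PySem.List.enumerate (x :: xs).tail 1).take (t + 1) =
          (PySem.List.enumerate (x :: xs).tail 1).take t ++
            [(((t + 1 : Nat) : Int), (x :: xs).getD (t + 1) 0)] := by
        simp only [List.tail_cons]
        rw [List.take_add_one, PySem.List.getElem?_enumerate, List.getElem?_eq_getElem hlt]
        simp only [Option.map_some, Option.toList_some]
        rw [List.getD_cons_succ, List.getD_eq_getElem xs 0 hlt,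
          (by push_cast; ring : (1 : Int) + (t : Int) = ((t + 1 : Nat) : Int))]
      rw [htake, List.foldl_append, List.foldl_cons, List.foldl_nil]
      exact invA_step (x :: xs) k t hk' (by simpa using ht) (ih (Or.inr hk') (by omega))

lemma solve_eq (nums : List Int) (k : Int) (hne : nums ≠ [])
    (hpre : 1 ≤ k ∨ nums.length = 1) :
    solve nums k = Dv nums k (nums.length - 1) := by
  have hn : 1 ≤ nums.length := List.length_pos_iff.mpr hne
  have hk' : nums.length - 1 = 0 ∨ 1 ≤ k := by
    rcases hpre with h | h
    · exact Or.inr h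
    · exact Or.inl (by omega)
  have H := invA_fold nums k hne (nums.length - 1) hk' (by omega)
  have htake' : (PySem.List.enumerate nums.tail 1).take (nums.length - 1) =
      PySem.List.enumerate nums.tail 1 :=
    List.take_of_length_le (by rw [PySem.List.length_enumerate, List.length_tail])
  rw [(by omega : nums.length - 1 + 1 = nums.length), htake'] at H
  obtain ⟨hpw, hform, -, hlen, hcost⟩ := H
  have hfin := drainAll_cost nums k _ _ (invA_nodup hpw hform) hform hlen hcost
  simp only [solve, PySem.List.slice_from_one]
  rw [PySem.List.pyGet?_neg_one, List.getLast?_eq_getElem?, hfin.1,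
    ← List.getD_eq_getElem?_getD, hfin.2 (nums.length - 1) (by omega)]

-- ===== VERDICT (by name: the statement is the Claim_ definition above) =====
theorem solve_spec : Claim_equal_solve := by
  intro nums k _ hpre
  unfold Pre_solve at hpre
  show solve nums k = solve_alt nums k
  rw [solve_eq nums k hpre.1 hpre.2, solve_alt_eq nums k hpre.1 hpre.2]
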